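-- pv_equiv track=rewrite | github.com/Mustafa-Noor/DSA-Lab | LAB 1/problem10.py | Sort10
-- ===== SOURCE A (Python) =====
-- def Sort10(Arr):
--     resArr = []
--     positiveNumbers = []
--     negativeNumbers = []
--
--     for num in Arr:
--         if num < 0:
--             negativeNumbers.append(num)
--         else:
--             positiveNumbers.append(num)
--
--     positiveNumbers = sorted(positiveNumbers)
--     negativeNumbers = sorted(negativeNumbers)
--
--     while negativeNumbers:
--         resArr.append(negativeNumbers[0])
--         negativeNumbers.pop(0)
--         if positiveNumbers:
--             resArr.append(positiveNumbers[0])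
--             positiveNumbers.pop(0)
--
--     while positiveNumbers:
--         resArr.append(positiveNumbers[0])
--         positiveNumbers.pop(0)
--
--
--     return resArr
-- ===== SOURCE B (Python) =====
-- def Sort10(Arr):
--     negativeNumbers = sorted(x for x in Arr if x < 0)
--     positiveNumbers = sorted(x for x in Arr if x >= 0)
--     res = []
--     for n, p in zip(negativeNumbers, positiveNumbers):
--         res.append(n)
--         res.append(p)
--     res += negativeNumbers[len(positiveNumbers):]
--     res += positiveNumbers[len(negativeNumbers):]
--     return res
-- ===== Notes on version B (the rewrite author's own statement) =====
-- stated objective: simpler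
-- what changed: Replaces the destructive while-loops that pop(0) from both sorted lists with comprehension-based partition, a zip over the paired prefixes, and slice-appended tails; pop(0) is linear per step so the interleave drops from quadratic to linear.
import Mathlib
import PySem

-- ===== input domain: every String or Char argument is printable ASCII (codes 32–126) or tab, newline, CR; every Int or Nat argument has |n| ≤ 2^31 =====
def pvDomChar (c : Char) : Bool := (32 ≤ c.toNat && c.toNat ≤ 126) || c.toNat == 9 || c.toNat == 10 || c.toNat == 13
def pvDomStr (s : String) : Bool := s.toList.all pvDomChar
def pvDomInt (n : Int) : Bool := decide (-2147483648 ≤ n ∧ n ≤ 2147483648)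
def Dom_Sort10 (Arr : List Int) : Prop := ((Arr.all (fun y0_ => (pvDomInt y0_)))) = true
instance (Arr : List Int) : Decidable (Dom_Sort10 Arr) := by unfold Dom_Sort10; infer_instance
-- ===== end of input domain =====

-- B replaces A's destructive pop(0) interleave loops with partition comprehensions, a zip
-- over the paired prefixes and slice-appended surplus tails (simpler, no quadratic popping).

-- ===== PORT A =====
-- second while loop: drain the remaining positives one by one
def Sort10_whilePos : List Int → List Int
  | [] => []
  | p :: ps => p :: Sort10_whilePos ps

-- first while loop: pop the head negative, then a head positive if any
def Sort10_whileNeg : List Int → List Int → List Int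
  | [], ps => Sort10_whilePos ps
  | n :: ns, [] => n :: Sort10_whileNeg ns []
  | n :: ns, p :: ps => n :: p :: Sort10_whileNeg ns ps

def Sort10 (Arr : List Int) : List Int :=
  -- for num in Arr: append to negativeNumbers if num < 0 else positiveNumbers
  let st := Arr.foldl (fun (st : List Int × List Int) num =>
    if num < 0 then (st.1 ++ [num], st.2) else (st.1, st.2 ++ [num])) ([], [])
  let negativeNumbers := PySem.List.sorted st.1 (fun x => x) false
  let positiveNumbers := PySem.List.sorted st.2 (fun x => x) false
  Sort10_whileNeg negativeNumbers positiveNumbers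

-- ===== PORT B =====
def Sort10_alt (Arr : List Int) : List Int :=
  let negativeNumbers := PySem.List.sorted (Arr.filter (fun x => decide (x < 0))) (fun x => x) false
  let positiveNumbers := PySem.List.sorted (Arr.filter (fun x => decide (0 ≤ x))) (fun x => x) false
  ((negativeNumbers.zip positiveNumbers).flatMap (fun np => [np.1, np.2]))
    ++ negativeNumbers.drop positiveNumbers.length
    ++ positiveNumbers.drop negativeNumbers.length

-- ===== PRECONDITION & SPEC =====
def Spec_Sort10 (Arr : List Int) (out : List Int) : Prop := out = Sort10_alt Arr
instance (Arr : List Int) (out : List Int) : Decidable (Spec_Sort10 Arr out) := by unfold Spec_Sort10; infer_instance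

-- ===== CLAIM (what is proved, stated in full; the proofs are below) =====
def Claim_equal_Sort10 : Prop := ∀ (Arr : List Int), Dom_Sort10 Arr → Spec_Sort10 Arr (Sort10 Arr)

-- ===== LEMMAS AND PROOFS =====
theorem whilePos_eq (ps : List Int) : Sort10_whilePos ps = ps := by
  induction ps with
  | nil => rfl
  | cons p ps ih => simp [Sort10_whilePos, ih]

theorem whileNeg_eq (ns : List Int) : ∀ ps : List Int,
    Sort10_whileNeg ns ps =
      ((ns.zip ps).flatMap (fun np => [np.1, np.2])) ++ ns.drop ps.length ++ ps.drop ns.length := by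
  induction ns with
  | nil => intro ps; simp [Sort10_whileNeg, whilePos_eq]
  | cons n ns ih =>
    intro ps
    cases ps with
    | nil => simp [Sort10_whileNeg, ih]
    | cons p ps => simp [Sort10_whileNeg, ih ps, List.flatMap]

theorem partition_eq (Arr : List Int) (a b : List Int) :
    Arr.foldl (fun (st : List Int × List Int) num =>
      if num < 0 then (st.1 ++ [num], st.2) else (st.1, st.2 ++ [num])) (a, b)
    = (a ++ Arr.filter (fun x => decide (x < 0)), b ++ Arr.filter (fun x => decide (0 ≤ x))) := by
  induction Arr generalizing a b with
  | nil => simp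
  | cons x xs ih =>
    by_cases h : x < 0
    · simp [List.foldl, h, ih, not_le.mpr h]
    · simp [List.foldl, h, ih, not_lt.mp h]

-- ===== VERDICT (by name: the statement is the Claim_ definition above) =====
theorem Sort10_spec : Claim_equal_Sort10 := by
  intro Arr _
  unfold Spec_Sort10 Sort10 Sort10_alt
  simp only [partition_eq Arr [] [], List.nil_append]
  exact whileNeg_eq _ _
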